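-- pv_equiv track=rewrite | github.com/MrBrantCode/unitest_baseline | mut_generate/mist_train_cf/cf_51362/solution.py | generate_prime_dict
-- ===== SOURCE A (Python) =====
-- def generate_prime_dict(n):
--   """Generate a dictionary with the first 'n' prime numbers as keys and their squares as values."""
--   primes = []
--   i = 2
--   while len(primes) < n:
--     for p in primes:
--       if i % p == 0:
--         break
--     else:
--       primes.append(i)
--     i += 1
--   return {p: p**2 for p in primes}
-- ===== SOURCE B (Python) =====
-- def generate_prime_dict(n):
--     """Generate a dictionary with the first 'n' prime numbers as keys and their squares as values."""
--     if n <= 0: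
--         return {}
--     limit = 16
--     while True:
--         is_prime = [True] * (limit + 1)
--         is_prime[0] = False
--         is_prime[1] = False
--         i = 2
--         while i * i <= limit:
--             if is_prime[i]:
--                 for j in range(i * i, limit + 1, i):
--                     is_prime[j] = False
--             i += 1
--         primes = [p for p, b in enumerate(is_prime) if b]
--         if len(primes) >= n:
--             return {p: p * p for p in primes[:n]}
--         limit *= 2
-- ===== Notes on version B (the rewrite author's own statement) =====
-- stated objective: faster
-- what changed: Replaced A's per-candidate trial division against the list of primes found so far by a sieve of Eratosthenes over a boolean array whose bound doubles until it contains n primes (marking multiples instead of testing divisors).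
import Mathlib
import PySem

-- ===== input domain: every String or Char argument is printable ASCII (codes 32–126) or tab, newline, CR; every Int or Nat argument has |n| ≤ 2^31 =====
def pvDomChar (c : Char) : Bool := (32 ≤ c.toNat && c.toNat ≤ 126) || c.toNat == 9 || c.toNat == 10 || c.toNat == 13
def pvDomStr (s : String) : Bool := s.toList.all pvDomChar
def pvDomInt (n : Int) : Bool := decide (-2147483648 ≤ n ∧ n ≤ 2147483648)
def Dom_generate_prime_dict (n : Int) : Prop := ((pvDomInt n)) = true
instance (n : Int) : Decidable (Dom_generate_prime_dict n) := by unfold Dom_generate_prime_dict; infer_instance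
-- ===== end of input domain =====

-- B replaces A's per-candidate trial division against the accumulated prime list by a
-- sieve of Eratosthenes over a doubling bound; measurably faster, identical return value.

-- ===== PORT A =====
-- A's 'while len(primes) < n' loop as structural recursion on a fuel counter that provably
-- dominates the number of iterations (2^(n+2), proved below); the loop body is A's, step for step.
def pvALoop (n : Int) : Nat → List Nat → Nat → List Nat
  | 0, primes, _ => primes
  | fuel + 1, primes, i =>
    if (primes.length : Int) < n then
      -- for p in primes: if i % p == 0: break / else: primes.append(i)
      pvALoop n fuel (if primes.any (fun p => i % p == 0) then primes else primes ++ [i]) (i + 1)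
    else primes

def generate_prime_dict (n : Int) : List (Int × Int) :=
  let primes := pvALoop n (2 ^ (n.toNat + 2)) [] 2
  -- {p: p**2 for p in primes}
  (primes.foldl (fun d p => d.insert (p : Int) ((p : Int) ^ 2)) PySem.Dict.empty).items

-- ===== PORT B =====
-- for j in range(i*i, limit+1, i): is_prime[j] = False
def pvSieveMark (limit i : Nat) (s : List Bool) : List Bool :=
  (List.range' (i * i) ((limit + 1 - i * i + i - 1) / i) i).foldl (fun s j => s.set j false) s

-- while i*i <= limit: if is_prime[i]: mark the multiples of i; i += 1
def pvSieveLoop (limit i : Nat) (s : List Bool) : List Bool :=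
  if i * i ≤ limit then
    pvSieveLoop limit (i + 1) (if s.getD i false then pvSieveMark limit i s else s)
  else s
  termination_by limit + 1 - i
  decreasing_by
    rcases Nat.eq_zero_or_pos i with h0 | h0
    · omega
    · have : i ≤ i * i := Nat.le_mul_of_pos_left i h0
      omega

-- the 'while True' doubling loop; fuel n+1 provably suffices (proved below)
def pvBLoop (n : Int) : Nat → Nat → List (Int × Int)
  | 0, _ => []
  | fuel + 1, limit =>
    let s0 := ((List.replicate (limit + 1) true).set 0 false).set 1 false
    let s := pvSieveLoop limit 2 s0
    -- primes = [p for p, b in enumerate(is_prime) if b]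
    let primes := ((PySem.List.enumerate s).filter (fun pb => pb.2)).map (fun pb => pb.1)
    if n ≤ (primes.length : Int) then
      -- {p: p * p for p in primes[:n]}
      ((primes.take n.toNat).foldl (fun d p => d.insert p (p * p)) PySem.Dict.empty).items
    else pvBLoop n fuel (limit * 2)

def generate_prime_dict_alt (n : Int) : List (Int × Int) :=
  if n ≤ 0 then [] else pvBLoop n (n.toNat + 1) 16

-- ===== PRECONDITION & SPEC =====
def Spec_generate_prime_dict (n : Int) (out : List (Int × Int)) : Prop := out = generate_prime_dict_alt n
instance (n : Int) (out : List (Int × Int)) : Decidable (Spec_generate_prime_dict n out) := by unfold Spec_generate_prime_dict; infer_instance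

-- ===== CLAIM (what is proved, stated in full; the proofs are below) =====
def Claim_equal_generate_prime_dict : Prop := ∀ (n : Int), Dom_generate_prime_dict n → Spec_generate_prime_dict n (generate_prime_dict n)

-- ===== LEMMAS AND PROOFS =====

-- the primes below m, in increasing order: the common value both ports compute
def pvPrimesUpTo (m : Nat) : List Nat := (List.range m).filter (fun j => decide (Nat.Prime j))

theorem pvPrimesUpTo_succ (i : Nat) :
    pvPrimesUpTo (i + 1) = pvPrimesUpTo i ++ if Nat.Prime i then [i] else [] := by
  simp [pvPrimesUpTo, List.range_succ, List.filter_append]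
  split_ifs with h <;> simp [h]

theorem pvPrimesUpTo_length (m : Nat) : (pvPrimesUpTo m).length = Nat.count Nat.Prime m := by
  simp [pvPrimesUpTo, Nat.count, List.countP_eq_length_filter]

theorem pvMem_primesUpTo {p m : Nat} : p ∈ pvPrimesUpTo m ↔ Nat.Prime p ∧ p < m := by
  simp [pvPrimesUpTo, List.mem_filter, List.mem_range, and_comm]

theorem pvPrimesUpTo_nodup (m : Nat) : (pvPrimesUpTo m).Nodup :=
  List.Nodup.filter _ List.nodup_range

theorem pvAnyDvd (i : Nat) (h2 : 2 ≤ i) :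
    (pvPrimesUpTo i).any (fun p => i % p == 0) = !decide (Nat.Prime i) := by
  by_cases hp : Nat.Prime i
  · simp only [hp, decide_true, Bool.not_true]
    rw [List.any_eq_false]
    intro p hmem
    rcases pvMem_primesUpTo.mp hmem with ⟨hpp, hlt⟩
    simp only [beq_iff_eq]
    intro heq
    have hdvd : p ∣ i := Nat.dvd_iff_mod_eq_zero.mpr heq
    rcases (Nat.Prime.eq_one_or_self_of_dvd hp p hdvd) with h | h
    · exact Nat.Prime.ne_one hpp h
    · omega
  · simp only [hp, decide_false, Bool.not_false]
    rw [List.any_eq_true]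
    refine ⟨i.minFac, ?_, ?_⟩
    · refine pvMem_primesUpTo.mpr ⟨Nat.minFac_prime (by omega), ?_⟩
      have hd := Nat.minFac_dvd i
      have hne : i.minFac ≠ i := by
        intro h
        exact hp (Nat.prime_def_minFac.mpr ⟨h2, h⟩)
      have := Nat.le_of_dvd (by omega) hd
      omega
    · simp [← Nat.dvd_iff_mod_eq_zero, Nat.minFac_dvd]

theorem pvCount_lt {n' i : Nat} (hn : 1 ≤ n') (hi : i ≤ Nat.nth Nat.Prime (n' - 1)) :
    Nat.count Nat.Prime i < n' := by
  have h := Nat.count_monotone Nat.Prime hi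
  have h2 : Nat.count Nat.Prime (Nat.nth Nat.Prime (n' - 1)) = n' - 1 :=
    Nat.count_nth_of_infinite Nat.infinite_setOf_prime _
  omega

theorem pvCount_target {n' : Nat} (hn : 1 ≤ n') :
    Nat.count Nat.Prime (Nat.nth Nat.Prime (n' - 1) + 1) = n' := by
  have := Nat.count_nth_succ (p := Nat.Prime) (n := n' - 1)
    (fun hf => absurd hf Nat.infinite_setOf_prime)
  omega

theorem pvNth_prime_lt_pow (k : Nat) : Nat.nth Nat.Prime k < 2 ^ (k + 2) := by
  induction k with
  | zero =>
    have h2 : Nat.nth Nat.Prime 0 ≤ 2 := by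
      rw [Nat.nth_zero]
      exact Nat.sInf_le (by exact Nat.prime_two)
    omega
  | succ k ih =>
    have hk := Nat.nth_mem_of_infinite Nat.infinite_setOf_prime k
    have hpos : Nat.nth Nat.Prime k ≠ 0 := Nat.Prime.ne_zero hk
    rcases Nat.bertrand _ hpos with ⟨q, hq, hlt, hle⟩
    have hnth : Nat.nth Nat.Prime (k + 1) ≤ q := by
      by_contra h
      rw [not_le] at h
      have := Nat.le_nth_of_lt_nth_succ h hq
      omega
    have : 2 ^ (k + 1 + 2) = 2 * 2 ^ (k + 2) := by ring
    omega

theorem pvALoop_eq (n : Int) (hn : 0 < n) :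
    ∀ (fuel i : Nat), 2 ≤ i → i ≤ Nat.nth Nat.Prime (n.toNat - 1) + 1 →
      Nat.nth Nat.Prime (n.toNat - 1) + 1 - i ≤ fuel →
      pvALoop n fuel (pvPrimesUpTo i) i = pvPrimesUpTo (Nat.nth Nat.Prime (n.toNat - 1) + 1) := by
  have hn' : 1 ≤ n.toNat := by omega
  have hnc : (n.toNat : Int) = n := Int.toNat_of_nonneg (by omega)
  intro fuel
  induction fuel with
  | zero =>
    intro i h2 hle hfuel
    have : i = Nat.nth Nat.Prime (n.toNat - 1) + 1 := by omega
    simp [pvALoop, this]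
  | succ fuel ih =>
    intro i h2 hle hfuel
    by_cases heq : i = Nat.nth Nat.Prime (n.toNat - 1) + 1
    · subst heq
      have hlen : (pvPrimesUpTo (Nat.nth Nat.Prime (n.toNat - 1) + 1)).length = n.toNat := by
        rw [pvPrimesUpTo_length]; exact pvCount_target hn'
      rw [pvALoop]
      rw [if_neg]
      rw [hlen, hnc]
      omega
    · have hilt : i ≤ Nat.nth Nat.Prime (n.toNat - 1) := by omega
      have hlen : (pvPrimesUpTo i).length < n.toNat := by
        rw [pvPrimesUpTo_length]; exact pvCount_lt hn' hilt
      rw [pvALoop, if_pos (by rw [← hnc]; exact_mod_cast hlen)]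
      have hnext : (if (pvPrimesUpTo i).any (fun p => i % p == 0) then pvPrimesUpTo i
          else pvPrimesUpTo i ++ [i]) = pvPrimesUpTo (i + 1) := by
        rw [pvAnyDvd i h2, pvPrimesUpTo_succ]
        by_cases hp : Nat.Prime i <;> simp [hp]
      rw [hnext]
      exact ih (i + 1) (by omega) (by omega) (by omega)

theorem pvDictBuild {l : List Int} (v : Int → Int) (hnd : l.Nodup) :
    (l.foldl (fun d p => d.insert p (v p)) PySem.Dict.empty).items = l.map (fun p => (p, v p)) := by
  have := PySem.Dict.items_foldl_insert_fresh (l := l) (k := fun p : Int => p) (v := v)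
    (d := PySem.Dict.empty) (fun a _ => PySem.Dict.contains_empty a) (by simpa using hnd)
  simpa using this

theorem pvDictBuildNat {l : List Nat} (v : Nat → Int) (hnd : l.Nodup) :
    (l.foldl (fun d p => d.insert (p : Int) (v p)) PySem.Dict.empty).items
      = l.map (fun p : Nat => ((p : Int), v p)) := by
  have hk : (l.map (fun p : Nat => (p : Int))).Nodup :=
    List.Nodup.map (fun a b h => by exact_mod_cast h) hnd
  have := PySem.Dict.items_foldl_insert_fresh (l := l) (k := fun p => (p : Int)) (v := v)
    (d := PySem.Dict.empty) (fun a _ => PySem.Dict.contains_empty _) hk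
  simpa using this

theorem pvA_eq (n : Int) (hn : 0 < n) :
    generate_prime_dict n =
      (pvPrimesUpTo (Nat.nth Nat.Prime (n.toNat - 1) + 1)).map (fun p : Nat => ((p : Int), (p : Int) ^ 2)) := by
  have h2 : pvPrimesUpTo 2 = ([] : List Nat) := by decide
  have hT2 : 2 ≤ Nat.nth Nat.Prime (n.toNat - 1) + 1 := by
    have := Nat.Prime.two_le (Nat.prime_nth_prime (n.toNat - 1))
    omega
  have hfuel : Nat.nth Nat.Prime (n.toNat - 1) + 1 - 2 ≤ 2 ^ (n.toNat + 2) := by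
    have h1 := pvNth_prime_lt_pow (n.toNat - 1)
    have h2 : 2 ^ (n.toNat - 1 + 2) ≤ 2 ^ (n.toNat + 2) :=
      Nat.pow_le_pow_right (by omega) (by omega)
    omega
  have hloop := pvALoop_eq n hn (2 ^ (n.toNat + 2)) 2 (le_refl 2) hT2 hfuel
  rw [h2] at hloop
  unfold generate_prime_dict
  rw [hloop, pvDictBuildNat (fun p => (p : Int) ^ 2) (pvPrimesUpTo_nodup _)]

theorem pvFoldl_set_length (l : List Nat) (s : List Bool) :
    (l.foldl (fun s j => s.set j false) s).length = s.length := by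
  induction l generalizing s with
  | nil => rfl
  | cons x t ih => simp [List.foldl_cons, ih]

theorem pvFoldl_set_getD (l : List Nat) (s : List Bool) (hl : ∀ x ∈ l, x < s.length) (j : Nat) :
    (l.foldl (fun s j => s.set j false) s).getD j false =
      if j ∈ l then false else s.getD j false := by
  induction l generalizing s with
  | nil => simp
  | cons x t ih =>
    have hx : x < s.length := hl x (by simp)
    rw [List.foldl_cons, ih _ (by intro y hy; simpa using hl y (List.mem_cons_of_mem _ hy))]
    by_cases hjt : j ∈ t
    · simp [hjt]
    · by_cases hjx : j = x
      · subst hjx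
        simp [hjt, List.getD_eq_getElem?_getD, hx]
      · simp [hjt, hjx, List.getD_eq_getElem?_getD, Ne.symm hjx]

theorem pvMem_markRange {limit i j : Nat} (h1 : 1 ≤ i) (hle : i * i ≤ limit) :
    j ∈ List.range' (i * i) ((limit + 1 - i * i + i - 1) / i) i ↔
      i ∣ j ∧ i * i ≤ j ∧ j ≤ limit := by
  obtain ⟨M, hM⟩ : ∃ M, limit + 1 - i * i = M := ⟨_, rfl⟩
  rw [hM]
  have hdm := Nat.div_add_mod (M + i - 1) i
  have hmod : (M + i - 1) % i < i := Nat.mod_lt _ (by omega)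
  have hM1 : 1 ≤ M := by omega
  have hup : i * ((M + i - 1) / i) ≤ M + i - 1 := by omega
  have hlo : M ≤ i * ((M + i - 1) / i) := by omega
  rw [List.mem_range']
  constructor
  · rintro ⟨t, ht, rfl⟩
    refine ⟨⟨i + t, by ring⟩, Nat.le_add_right _ _, ?_⟩
    have h5 : i * (t + 1) ≤ i * ((M + i - 1) / i) := Nat.mul_le_mul_left i (by omega)
    have h6 : i * (t + 1) = i * t + i := by ring
    omega
  · rintro ⟨⟨c, hc⟩, hge, hub⟩
    have hci : i ≤ c := Nat.le_of_mul_le_mul_left (show i * i ≤ i * c by omega) (show 0 < i by omega)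
    have hmsub : i * (c - i) = i * c - i * i := Nat.mul_sub i c i
    refine ⟨c - i, ?_, by omega⟩
    have h7 : i * (c - i) < i * ((M + i - 1) / i) := by omega
    exact Nat.lt_of_mul_lt_mul_left h7

def pvInv (limit k : Nat) (s : List Bool) : Prop :=
  s.length = limit + 1 ∧
    ∀ j, j ≤ limit →
      (s.getD j false = true ↔ 2 ≤ j ∧ ∀ p, Nat.Prime p → p < k → p * p ≤ j → ¬ p ∣ j)

theorem pvInv_init (limit : Nat) :
    pvInv limit 2 (((List.replicate (limit + 1) true).set 0 false).set 1 false) := by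
  constructor
  · simp
  · intro j hj
    have hget : (((List.replicate (limit + 1) true).set 0 false).set 1 false).getD j false
        = decide (2 ≤ j) := by
      rcases Nat.lt_or_ge j 2 with h | h
      · interval_cases j
        · simp [List.getD_eq_getElem?_getD]
        · have h0 : 0 < limit := by omega
          simp [List.getD_eq_getElem?_getD, h0]
      · have hjl : j < limit + 1 := by omega
        have h0 : ¬ ((0 : Nat) = j) := by omega
        have h1 : ¬ ((1 : Nat) = j) := by omega
        simp [List.getD_eq_getElem?_getD, hjl, h0, h1, h]
    rw [hget]
    constructor
    · intro h
      refine ⟨by simpa using h, ?_⟩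
      intro p hp hlt
      have := hp.two_le
      omega
    · intro ⟨h, _⟩
      simpa using h
theorem pvInv_guard {limit i : Nat} {s : List Bool} (hI : pvInv limit i s) (h2 : 2 ≤ i)
    (hle : i ≤ limit) : (s.getD i false = true) ↔ Nat.Prime i := by
  rw [hI.2 i hle]
  constructor
  · intro ⟨_, h⟩
    by_contra hnp
    have hmf := Nat.minFac_prime (show i ≠ 1 by omega)
    have hdvd := Nat.minFac_dvd i
    have hlt : i.minFac < i := by
      have hne : i.minFac ≠ i := fun hh => hnp (Nat.prime_def_minFac.mpr ⟨h2, hh⟩)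
      have := Nat.le_of_dvd (by omega) hdvd
      omega
    have hsq : i.minFac * i.minFac ≤ i := by
      have := Nat.minFac_sq_le_self (by omega) hnp
      simpa [pow_two] using this
    exact h i.minFac hmf hlt hsq hdvd
  · intro hp
    refine ⟨hp.two_le, ?_⟩
    intro p hpp hlt hsq hdvd
    rcases (Nat.Prime.eq_one_or_self_of_dvd hp p hdvd) with h | h
    · exact hpp.ne_one h
    · omega

theorem pvInv_step {limit i : Nat} {s : List Bool} (hI : pvInv limit i s) (h2 : 2 ≤ i)
    (hle : i * i ≤ limit) :
    pvInv limit (i + 1) (if s.getD i false then pvSieveMark limit i s else s) := by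
  have hil : i ≤ limit := le_trans (Nat.le_mul_of_pos_left i (by omega)) hle
  have hguard := pvInv_guard hI h2 hil
  by_cases hp : Nat.Prime i
  · rw [if_pos (hguard.mpr hp)]
    have hlen : (pvSieveMark limit i s).length = limit + 1 := by
      rw [pvSieveMark, pvFoldl_set_length, hI.1]
    refine ⟨hlen, ?_⟩
    intro j hj
    have hget : (pvSieveMark limit i s).getD j false =
        if j ∈ List.range' (i * i) ((limit + 1 - i * i + i - 1) / i) i then false
        else s.getD j false := by
      rw [pvSieveMark]
      refine pvFoldl_set_getD _ _ ?_ j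
      intro x hx
      rw [hI.1]
      have := (pvMem_markRange (by omega) hle).mp hx
      omega
    rw [hget]
    by_cases hmem : j ∈ List.range' (i * i) ((limit + 1 - i * i + i - 1) / i) i
    · rcases (pvMem_markRange (by omega) hle).mp hmem with ⟨hdvd, hsq, _⟩
      simp only [hmem, if_true]
      constructor
      · intro h; exact absurd h (by simp)
      · intro ⟨_, h⟩
        exact absurd hdvd (h i hp (by omega) hsq)
    · rw [if_neg hmem, hI.2 j hj]
      have hnot : ¬ (i ∣ j ∧ i * i ≤ j) := by
        intro ⟨hd, hs⟩
        exact hmem ((pvMem_markRange (by omega) hle).mpr ⟨hd, hs, hj⟩)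
      constructor
      · intro ⟨hj2, h⟩
        refine ⟨hj2, ?_⟩
        intro p hpp hplt hpsq hpd
        rcases Nat.lt_or_ge p i with hpi | hpi
        · exact h p hpp hpi hpsq hpd
        · have : p = i := by omega
          subst this
          exact hnot ⟨hpd, hpsq⟩
      · intro ⟨hj2, h⟩
        exact ⟨hj2, fun p hpp hplt hpsq => h p hpp (by omega) hpsq⟩
  · rw [if_neg (show ¬ s.getD i false = true from fun h => hp (hguard.mp h))]
    refine ⟨hI.1, ?_⟩
    intro j hj
    rw [hI.2 j hj]
    constructor
    · intro ⟨hj2, h⟩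
      refine ⟨hj2, ?_⟩
      intro p hpp hplt hpsq hpd
      rcases Nat.lt_or_ge p i with hpi | hpi
      · exact h p hpp hpi hpsq hpd
      · have : p = i := by omega
        subst this
        exact hp hpp
    · intro ⟨hj2, h⟩
      exact ⟨hj2, fun p hpp hplt hpsq => h p hpp (by omega) hpsq⟩

theorem pvInv_exit {limit i : Nat} {s : List Bool} (hI : pvInv limit i s)
    (hgt : ¬ i * i ≤ limit) : ∀ j, j ≤ limit → s.getD j false = decide (Nat.Prime j) := by
  intro j hj
  by_cases hp : Nat.Prime j
  · simp only [hp, decide_true]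
    rw [hI.2 j hj]
    refine ⟨hp.two_le, ?_⟩
    intro p hpp hplt hpsq hpd
    rcases hp.eq_one_or_self_of_dvd p hpd with h | h
    · exact hpp.ne_one h
    · subst h
      have := hp.two_le
      nlinarith
  · simp only [hp, decide_false]
    rw [← Bool.not_eq_true]
    rw [hI.2 j hj]
    rcases Nat.lt_or_ge j 2 with h2 | h2
    · intro ⟨hj2, _⟩; omega
    · intro ⟨_, h⟩
      have hmf := Nat.minFac_prime (show j ≠ 1 by omega)
      have hdvd := Nat.minFac_dvd j
      have hsq : j.minFac * j.minFac ≤ j := by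
        have := Nat.minFac_sq_le_self (show 0 < j by omega) hp
        simpa [pow_two] using this
      have hplt : j.minFac < i := by
        rw [← Nat.mul_self_lt_mul_self_iff]
        omega
      exact h j.minFac hmf hplt hsq hdvd

theorem pvSieveLoopAux (limit : Nat) :
    ∀ (k i : Nat) (s : List Bool), limit + 1 - i ≤ k → 2 ≤ i → pvInv limit i s →
      (pvSieveLoop limit i s).length = limit + 1 ∧
        ∀ j, j ≤ limit → (pvSieveLoop limit i s).getD j false = decide (Nat.Prime j) := by
  intro k
  induction k with
  | zero =>
    intro i s hk h2 hI
    have hgt : ¬ i * i ≤ limit := by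
      intro hcon
      have : i ≤ i * i := Nat.le_mul_of_pos_left i (by omega)
      omega
    rw [pvSieveLoop, if_neg hgt]
    exact ⟨hI.1, pvInv_exit hI hgt⟩
  | succ k ih =>
    intro i s hk h2 hI
    rw [pvSieveLoop]
    by_cases hle : i * i ≤ limit
    · rw [if_pos hle]
      have hil : i ≤ limit := le_trans (Nat.le_mul_of_pos_left i (by omega)) hle
      exact ih (i + 1) _ (by omega) (by omega) (pvInv_step hI h2 hle)
    · rw [if_neg hle]
      exact ⟨hI.1, pvInv_exit hI hle⟩

theorem pvSieveLoop_correct (limit : Nat) :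
    ∀ (i : Nat) (s : List Bool), 2 ≤ i → pvInv limit i s →
      (pvSieveLoop limit i s).length = limit + 1 ∧
        ∀ j, j ≤ limit → (pvSieveLoop limit i s).getD j false = decide (Nat.Prime j) :=
  fun i s h2 hI => pvSieveLoopAux limit (limit + 1 - i) i s (le_refl _) h2 hI

theorem pvSieve_eq (limit : Nat) :
    pvSieveLoop limit 2 (((List.replicate (limit + 1) true).set 0 false).set 1 false) =
      (List.range (limit + 1)).map (fun j => decide (Nat.Prime j)) := by
  have h := pvSieveLoop_correct limit 2 _ (le_refl 2) (pvInv_init limit)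
  apply List.ext_getElem
  · simp [h.1]
  · intro j hj hj2
    have hjl : j ≤ limit := by simp [h.1] at hj; omega
    have := h.2 j hjl
    simp only [List.getElem_map, List.getElem_range]
    rw [← this, List.getD_eq_getElem _ false hj]

theorem pvEnumFilter (m : Nat) (g : Nat → Bool) :
    ((PySem.List.enumerate ((List.range m).map g)).filter (fun pb => pb.2)).map (fun pb => pb.1) =
      ((List.range m).filter g).map (fun j : Nat => (j : Int)) := by
  suffices h : ∀ (len b : Nat),
      ((PySem.List.enumerate ((List.range' b len).map g) (b : Int)).filter (fun pb => pb.2)).map (fun pb => pb.1) =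
        ((List.range' b len).filter g).map (fun j : Nat => (j : Int)) by
    have := h m 0
    simpa [List.range_eq_range'] using this
  intro len
  induction len with
  | zero => intro b; simp
  | succ len ih =>
    intro b
    rw [List.range'_succ]
    simp only [List.map_cons, PySem.List.enumerate, List.filter_cons]
    have hb : ((b : Int) + 1) = ((b + 1 : Nat) : Int) := by push_cast; ring
    by_cases hg : g b
    · simp only [hg, if_true, List.map_cons]
      rw [hb, ih (b + 1)]
    · simp only [hg, Bool.false_eq_true, if_false]
      rw [hb, ih (b + 1)]

theorem pvTake_primes {n' limit : Nat} (hn : 1 ≤ n') (hcnt : n' ≤ Nat.count Nat.Prime (limit + 1)) :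
    (pvPrimesUpTo (limit + 1)).take n' = pvPrimesUpTo (Nat.nth Nat.Prime (n' - 1) + 1) := by
  have hT : Nat.nth Nat.Prime (n' - 1) + 1 ≤ limit + 1 := by
    have h1 : n' - 1 < Nat.count Nat.Prime (limit + 1) := by omega
    have := (Nat.lt_nth_iff_count_lt (p := Nat.Prime) Nat.infinite_setOf_prime).mp h1
    omega
  have hpre : pvPrimesUpTo (Nat.nth Nat.Prime (n' - 1) + 1) <+: pvPrimesUpTo (limit + 1) := by
    apply List.IsPrefix.filter
    rw [List.prefix_iff_eq_take, List.take_range]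
    simp [Nat.min_eq_left hT]
  have hlen : (pvPrimesUpTo (Nat.nth Nat.Prime (n' - 1) + 1)).length = n' := by
    rw [pvPrimesUpTo_length]; exact pvCount_target hn
  rw [List.prefix_iff_eq_take, hlen] at hpre
  exact hpre.symm

theorem pvBLoop_eq (n : Int) (hn : 0 < n) :
    ∀ (fuel limit : Nat), 1 ≤ limit → Nat.nth Nat.Prime (n.toNat - 1) ≤ limit * 2 ^ fuel →
      pvBLoop n (fuel + 1) limit =
        (pvPrimesUpTo (Nat.nth Nat.Prime (n.toNat - 1) + 1)).map
          (fun p : Nat => ((p : Int), (p : Int) * (p : Int))) := by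
  have hn' : 1 ≤ n.toNat := by omega
  have hnc : (n.toNat : Int) = n := Int.toNat_of_nonneg (by omega)
  have hprimes : ∀ limit : Nat,
      ((PySem.List.enumerate (pvSieveLoop limit 2
          (((List.replicate (limit + 1) true).set 0 false).set 1 false))).filter
            (fun pb => pb.2)).map (fun pb => pb.1)
        = (pvPrimesUpTo (limit + 1)).map (fun j : Nat => (j : Int)) := by
    intro limit
    rw [pvSieve_eq limit]
    exact pvEnumFilter (limit + 1) _
  have hret : ∀ limit : Nat, n.toNat ≤ Nat.count Nat.Prime (limit + 1) →
      ((((pvPrimesUpTo (limit + 1)).map (fun j : Nat => (j : Int))).take n.toNat).foldl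
          (fun d p => d.insert p (p * p)) PySem.Dict.empty).items
        = (pvPrimesUpTo (Nat.nth Nat.Prime (n.toNat - 1) + 1)).map
            (fun p : Nat => ((p : Int), (p : Int) * (p : Int))) := by
    intro limit hcnt
    rw [← List.map_take, pvTake_primes hn' hcnt]
    rw [pvDictBuild (fun q => q * q)
      (List.Nodup.map (fun a b h => by exact_mod_cast h) (pvPrimesUpTo_nodup _))]
    rw [List.map_map]
    rfl
  intro fuel
  induction fuel with
  | zero =>
    intro limit hl hbound
    have hcnt : n.toNat ≤ Nat.count Nat.Prime (limit + 1) := by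
      have h1 : Nat.nth Nat.Prime (n.toNat - 1) < limit + 1 := by
        simpa using hbound
      have := (Nat.lt_nth_iff_count_lt (p := Nat.Prime) Nat.infinite_setOf_prime).mpr h1
      omega
    rw [pvBLoop]
    simp only [hprimes]
    rw [if_pos]
    · exact hret limit hcnt
    · rw [List.length_map, pvPrimesUpTo_length, ← hnc]
      exact_mod_cast hcnt
  | succ fuel ih =>
    intro limit hl hbound
    rw [pvBLoop]
    simp only [hprimes]
    by_cases hguard : n ≤ (((pvPrimesUpTo (limit + 1)).map (fun j : Nat => (j : Int))).length : Int)
    · rw [if_pos hguard]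
      apply hret limit
      rw [List.length_map, pvPrimesUpTo_length] at hguard
      omega
    · rw [if_neg hguard]
      apply ih (limit * 2) (by omega)
      have : limit * 2 * 2 ^ fuel = limit * 2 ^ (fuel + 1) := by ring
      omega

theorem pvB_eq (n : Int) (hn : 0 < n) :
    generate_prime_dict_alt n =
      (pvPrimesUpTo (Nat.nth Nat.Prime (n.toNat - 1) + 1)).map
        (fun p : Nat => ((p : Int), (p : Int) * (p : Int))) := by
  have hn' : 1 ≤ n.toNat := by omega
  rw [generate_prime_dict_alt, if_neg (by omega)]
  apply pvBLoop_eq n hn n.toNat 16 (by omega)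
  have h1 := pvNth_prime_lt_pow (n.toNat - 1)
  have h2 : 2 ^ (n.toNat - 1 + 2) ≤ 2 ^ (n.toNat + 1) := Nat.pow_le_pow_right (by omega) (by omega)
  have h3 : 2 ^ (n.toNat + 1) ≤ 16 * 2 ^ n.toNat := by
    have : 2 ^ (n.toNat + 1) = 2 * 2 ^ n.toNat := by ring
    omega
  omega


-- ===== VERDICT (by name: the statement is the Claim_ definition above) =====
theorem generate_prime_dict_spec : Claim_equal_generate_prime_dict := by
  intro n _
  unfold Spec_generate_prime_dict
  by_cases hle : n ≤ 0
  · have hA : generate_prime_dict n = [] := by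
      have : n.toNat = 0 := Int.toNat_of_nonpos hle
      simp [generate_prime_dict, this, pvALoop, not_lt.mpr hle, PySem.Dict.empty]
    have hB : generate_prime_dict_alt n = [] := by
      simp [generate_prime_dict_alt, hle]
    rw [hA, hB]
  · have hpos : 0 < n := by omega
    rw [pvA_eq n hpos, pvB_eq n hpos]
    refine List.map_congr_left ?_
    intro p _
    simp [pow_two]
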